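-- pv_equiv track=rewrite | github.com/WillJeynes/LLMsForDisinformationAnalysis | supporting/RAGAS_Service/train_flan.py | label_to_int
-- ===== SOURCE A (Python) =====
-- LABEL_PRIORITY = [
--     ("PERFECT", 0),
--     ("STORY", 1),
--     ("NSPECIFIC", 2),
--     ("REWORDING", 1),
--     ("TINCORRECT", -1),
--     ("DUPLICATE", -1),
--     ("", 0),
-- ]
--
-- def label_to_int(extra_info: str) -> int:
--     if extra_info is None:
--         extra_info = ""
--     extra_info = extra_info.strip()
--     if extra_info == "":
--         for key, value in LABEL_PRIORITY:
--             if key == "":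
--                 return value
--         raise ValueError("Empty extra_info but no empty mapping defined")
--     tokens = set(extra_info.upper().split())
--     for key, value in LABEL_PRIORITY:
--         if key == "" :
--             continue
--         if key in tokens:
--             return value
--     raise ValueError(f"Unknown label content: '{extra_info}'")
-- ===== SOURCE B (Python) =====
-- LABEL_PRIORITY = [
--     ("PERFECT", 0),
--     ("STORY", 1),
--     ("NSPECIFIC", 2),
--     ("REWORDING", 1),
--     ("TINCORRECT", -1),
--     ("DUPLICATE", -1),
--     ("", 0),
-- ]
--
-- # table-position rank and value for every non-empty label, built once
-- _RANKED = {k: (i, v) for i, (k, v) in enumerate(LABEL_PRIORITY) if k != ""}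
--
-- def label_to_int(extra_info: str) -> int:
--     if extra_info is None:
--         extra_info = ""
--     extra_info = extra_info.strip()
--     if extra_info == "":
--         return 0
--     best = None
--     for tok in extra_info.upper().split():
--         hit = _RANKED.get(tok)
--         if hit is not None and (best is None or hit[0] < best[0]):
--             best = hit
--     if best is None:
--         raise ValueError(f"Unknown label content: '{extra_info}'")
--     return best[1]
-- ===== Notes on version B (the rewrite author's own statement) =====
-- stated objective: alternative
-- what changed: B drives the loop over the input tokens with a precomputed label->(rank,value) dict and keeps the minimum-rank match, instead of A's scan over the fixed priority table with a set-membership test per table row.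
import Mathlib
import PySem

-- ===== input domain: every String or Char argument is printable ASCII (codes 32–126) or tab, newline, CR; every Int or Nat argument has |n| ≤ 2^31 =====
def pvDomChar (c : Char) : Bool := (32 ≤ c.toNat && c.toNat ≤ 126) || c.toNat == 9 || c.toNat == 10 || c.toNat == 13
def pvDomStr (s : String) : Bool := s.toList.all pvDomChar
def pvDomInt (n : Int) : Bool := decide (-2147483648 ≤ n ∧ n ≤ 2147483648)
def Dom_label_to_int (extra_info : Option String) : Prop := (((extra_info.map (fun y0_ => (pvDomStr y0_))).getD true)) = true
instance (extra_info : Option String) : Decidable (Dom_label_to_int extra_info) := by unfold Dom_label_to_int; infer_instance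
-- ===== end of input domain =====

-- B replaces A's scan over the priority table (set-membership test per table row) by a loop over
-- the input tokens with a precomputed label->(rank,value) dict, keeping the minimum-rank match.

-- ===== PORT A =====
def LABEL_PRIORITY : List (String × Int) :=
  [("PERFECT", 0), ("STORY", 1), ("NSPECIFIC", 2), ("REWORDING", 1),
   ("TINCORRECT", -1), ("DUPLICATE", -1), ("", 0)]

-- the 'for key, value in LABEL_PRIORITY' loop of the empty-string branch; none = ValueError
def aEmptyScan : List (String × Int) → Option Int
  | [] => none
  | (k, v) :: rest => if k = "" then some v else aEmptyScan rest

-- the main 'for key, value in LABEL_PRIORITY' loop; none = ValueError (excluded by Pre_)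
def aScan (tokens : PySem.Set String) : List (String × Int) → Option Int
  | [] => none
  | (k, v) :: rest =>
      if k = "" then aScan tokens rest
      else if PySem.Set.contains tokens k then some v
      else aScan tokens rest

def label_to_int (extra_info : Option String) : Int :=
  let s := PySem.Str.strip (extra_info.getD "")
  if s = "" then (aEmptyScan LABEL_PRIORITY).getD 0
  else
    let tokens := PySem.Set.ofList (PySem.Str.split₀ (PySem.Str.upper s))
    (aScan tokens LABEL_PRIORITY).getD 0

-- ===== PORT B =====
-- _RANKED = {k: (i, v) for i, (k, v) in enumerate(LABEL_PRIORITY) if k != ""}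
def RANKED : PySem.Dict String (Int × Int) :=
  (PySem.List.enumerate LABEL_PRIORITY 0).foldl
    (fun d p => if p.2.1 = "" then d else d.insert p.2.1 (p.1, p.2.2)) PySem.Dict.empty

-- the 'for tok in …' loop carrying best; none at the end = ValueError (excluded by Pre_)
def bLoop (ts : List String) (best : Option (Int × Int)) : Option (Int × Int) :=
  match ts with
  | [] => best
  | t :: rest =>
      let best' :=
        match RANKED.get? t with
        | none => best
        | some hit =>
            match best with
            | none => some hit
            | some b => if hit.1 < b.1 then some hit else best
      bLoop rest best'

def label_to_int_alt (extra_info : Option String) : Int :=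
  let s := PySem.Str.strip (extra_info.getD "")
  if s = "" then 0
  else
    match bLoop (PySem.Str.split₀ (PySem.Str.upper s)) none with
    | none => 0
    | some b => b.2

-- ===== PRECONDITION & SPEC =====
-- Pre_ excludes exactly the inputs on which Python A raises ValueError (a non-empty stripped
-- string none of whose whitespace-split tokens is a known label); Python B raises the same error there.
def Pre_label_to_int (extra_info : Option String) : Prop :=
  let s := PySem.Str.strip (extra_info.getD "")
  s = "" ∨
    (PySem.Str.split₀ (PySem.Str.upper s)).any
      (fun t => ["PERFECT", "STORY", "NSPECIFIC", "REWORDING", "TINCORRECT", "DUPLICATE"].contains t) = true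
instance (extra_info : Option String) : Decidable (Pre_label_to_int extra_info) := by
  unfold Pre_label_to_int; infer_instance

def pvWitness_label_to_int : Option String := some "perfect story"

def Spec_label_to_int (extra_info : Option String) (out : Int) : Prop := out = label_to_int_alt extra_info
instance (extra_info : Option String) (out : Int) : Decidable (Spec_label_to_int extra_info out) := by
  unfold Spec_label_to_int; infer_instance

-- ===== CLAIM (what is proved, stated in full; the proofs are below) =====
def Claim_equal_label_to_int : Prop := ∀ (extra_info : Option String), Dom_label_to_int extra_info → Pre_label_to_int extra_info → Spec_label_to_int extra_info (label_to_int extra_info)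

-- ===== LEMMAS AND PROOFS =====

-- min-by-rank combine (new hit wins only strictly): the step of bLoop
def minB (a b : Option (Int × Int)) : Option (Int × Int) :=
  match a, b with
  | none, b => b
  | a, none => a
  | some x, some y => if y.1 < x.1 then some y else some x

-- RANKED is a closed literal dict; its lookup as a chain of ifs
lemma RANKED_get (t : String) : RANKED.get? t =
    (if "PERFECT" = t then some ((0:Int),(0:Int)) else if "STORY" = t then some (1,1)
     else if "NSPECIFIC" = t then some (2,2) else if "REWORDING" = t then some (3,1)
     else if "TINCORRECT" = t then some (4,-1) else if "DUPLICATE" = t then some (5,-1) else none) := by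
  have h : RANKED = PySem.Dict.mk [("PERFECT",((0:Int),(0:Int))),("STORY",(1,1)),("NSPECIFIC",(2,2)),("REWORDING",(3,1)),("TINCORRECT",(4,-1)),("DUPLICATE",(5,-1))] := by rfl
  rw [h]
  simp only [PySem.Dict.get?_mk_cons, beq_iff_eq]
  split_ifs <;> rfl

lemma minB_comb (hit b c : Int × Int) :
    minB (if hit.1 < b.1 then some hit else some b) (some c)
      = minB (some b) (minB (some hit) (some c)) := by
  by_cases h1 : hit.1 < b.1 <;> by_cases h2 : c.1 < hit.1 <;> by_cases h3 : c.1 < b.1 <;>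
    simp [minB, h1, h2, h3] <;> omega

lemma bLoop_eq_minB (ts : List String) (best : Option (Int × Int)) :
    bLoop ts best = minB best (bLoop ts none) := by
  induction ts generalizing best with
  | nil => cases best <;> rfl
  | cons t rest ih =>
    simp only [bLoop]
    cases h : RANKED.get? t with
    | none =>
      cases best with
      | none => rfl
      | some b => rw [ih (some b)]
    | some hit =>
      cases best with
      | none => rfl
      | some b =>
        rw [ih (if hit.1 < b.1 then some hit else some b), ih (some hit)]
        cases hb : bLoop rest none with
        | none => split_ifs with hlt <;> simp [minB, hlt]
        | some c => exact minB_comb hit b c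

-- first-match-in-table result, as a function of the token list
def specB (ts : List String) : Option (Int × Int) :=
  if "PERFECT" ∈ ts then some (0, 0)
  else if "STORY" ∈ ts then some (1, 1)
  else if "NSPECIFIC" ∈ ts then some (2, 2)
  else if "REWORDING" ∈ ts then some (3, 1)
  else if "TINCORRECT" ∈ ts then some (4, -1)
  else if "DUPLICATE" ∈ ts then some (5, -1)
  else none

lemma bLoop_eq_specB (ts : List String) : bLoop ts none = specB ts := by
  induction ts with
  | nil => rfl
  | cons t rest ih =>
    have hstep : bLoop (t :: rest) none = minB (RANKED.get? t) (specB rest) := by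
      simp only [bLoop]
      cases h : RANKED.get? t with
      | none => rw [ih]; rfl
      | some hit => rw [bLoop_eq_minB rest (some hit), ih]
    rw [hstep, RANKED_get]
    split_ifs with h1 h2 h3 h4 h5 h6
    · subst h1; simp only [specB, List.mem_cons]; norm_num; split_ifs <;> simp_all [minB]
    · subst h2; simp only [specB, List.mem_cons]; norm_num; split_ifs <;> simp_all [minB]
    · subst h3; simp only [specB, List.mem_cons]; norm_num; split_ifs <;> simp_all [minB]
    · subst h4; simp only [specB, List.mem_cons]; norm_num; split_ifs <;> simp_all [minB]
    · subst h5; simp only [specB, List.mem_cons]; norm_num; split_ifs <;> simp_all [minB]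
    · subst h6; simp only [specB, List.mem_cons]; norm_num; split_ifs <;> simp_all [minB]
    · simp only [specB, List.mem_cons, h1, h2, h3, h4, h5, h6, false_or]
      cases specB rest
      all_goals split_ifs <;> rfl

lemma aScan_eq_specB (ts : List String) :
    aScan (PySem.Set.ofList ts) LABEL_PRIORITY = (specB ts).map (·.2) := by
  by_cases p1 : "PERFECT" ∈ ts <;> by_cases p2 : "STORY" ∈ ts <;>
    by_cases p3 : "NSPECIFIC" ∈ ts <;> by_cases p4 : "REWORDING" ∈ ts <;>
    by_cases p5 : "TINCORRECT" ∈ ts <;> by_cases p6 : "DUPLICATE" ∈ ts <;>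
    simp [LABEL_PRIORITY, aScan, specB, PySem.Set.mem_ofList, p1, p2, p3, p4, p5, p6]

-- ===== VERDICT (by name: the statement is the Claim_ definition above) =====
theorem label_to_int_spec : Claim_equal_label_to_int := by
  intro ei _ _
  unfold Spec_label_to_int label_to_int label_to_int_alt
  by_cases hs : PySem.Str.strip (ei.getD "") = ""
  · simp [hs, aEmptyScan, LABEL_PRIORITY]
  · simp only [hs, if_false]
    rw [bLoop_eq_specB, aScan_eq_specB]
    cases specB (PySem.Str.split₀ (PySem.Str.upper (PySem.Str.strip (ei.getD "")))) <;> rfl
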